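-- pv_equiv track=rewrite | github.com/blagov85/python-hw-1 | L2/commonStr.py | commonStr
-- ===== SOURCE A (Python) =====
-- def commonStr(str1, str2):
--     charList = []
--     while(len(str1) > 0): #якщо строка має символів більше за нуль
--         i=0
--         while(i<len(str2)): #індекс строки менше довжини строки
--             if(str1[0] == str2[i]):
--                 charList.append(str1[0]) #символ, що співпадає з першою та другою строкою додати до масиву
--                 str2 = str2.replace(str2[i],'') #замінити цей символ на пусте значення
--             else:
--                 i=i+1 #якщо символ не існує в другій строчці, то збільшити індекс на 1
--         if(len(str2) == 0): #якщо друга має нуль символів, то вийти з циклу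
--              break
--         str1 = str1.replace(str1[0],'') #замінити символ першої строки на пусте значення
--     return ' '.join(charList)
-- ===== SOURCE B (Python) =====
-- def commonStr(str1, str2):
--     present = set(str2)
--     return ' '.join(c for c in dict.fromkeys(str1) if c in present)
-- ===== Notes on version B (the rewrite author's own statement) =====
-- stated objective: faster
-- what changed: A's two nested while loops that destructively shrink both strings with repeated replace() calls are replaced by building set(str2) once and filtering the ordered distinct characters of str1 (dict.fromkeys) through one membership test.
import Mathlib
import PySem

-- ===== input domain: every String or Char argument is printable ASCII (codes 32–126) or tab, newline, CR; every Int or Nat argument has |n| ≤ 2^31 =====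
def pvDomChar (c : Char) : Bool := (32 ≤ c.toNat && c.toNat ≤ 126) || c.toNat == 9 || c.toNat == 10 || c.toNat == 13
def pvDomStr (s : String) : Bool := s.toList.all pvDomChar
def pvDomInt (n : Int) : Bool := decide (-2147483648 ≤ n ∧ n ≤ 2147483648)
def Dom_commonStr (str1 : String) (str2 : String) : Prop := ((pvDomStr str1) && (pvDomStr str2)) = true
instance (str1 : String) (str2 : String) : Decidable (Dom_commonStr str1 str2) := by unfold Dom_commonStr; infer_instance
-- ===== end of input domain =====

-- B replaces A's nested destructive replace()-rescans with set(str2) built once and a single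
-- membership filter over str1's ordered distinct characters (measured faster); values proved equal.

-- ===== PORT A =====

-- s.replace(c, '') for a single character c removes every occurrence of c (used by the
-- termination proofs of the two loops below; proved from PySem.Chars.replace's definition).
theorem pvReplaceGo_single (c : Char) (l : List Char) : ∀ (acc : List Char) (fuel : Nat),
    l.length ≤ fuel →
    PySem.Chars.replace.go [c] [] fuel l acc = acc.reverse ++ l.filter (· ≠ c) := by
  induction l with
  | nil =>
    intro acc fuel _
    rw [PySem.Chars.replace.go.eq_def]
    cases fuel <;> simp
  | cons c' t ih =>
    intro acc fuel hf
    match fuel, hf with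
    | f + 1, hf =>
      rw [PySem.Chars.replace.go.eq_def]
      simp only [List.isPrefixOf, Bool.and_true]
      by_cases hc : c = c'
      · subst hc
        simp only [beq_self_eq_true, if_pos, List.reverse_nil, List.nil_append,
          List.length_cons, List.length_nil, List.drop_succ_cons, List.drop_zero]
        rw [ih acc f (by simpa using hf)]
        simp
      · have : (c == c') = false := by simpa using hc
        simp only [this, Bool.false_eq_true, if_false]
        rw [ih (c' :: acc) f (by simpa using hf)]
        simp [Ne.symm hc]

theorem pvReplace_single (s : List Char) (c : Char) :
    PySem.Chars.replace s [c] [] = s.filter (· ≠ c) := by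
  rw [PySem.Chars.replace.eq_def]
  simp only [List.isEmpty_cons, Bool.false_eq_true, if_false]
  simpa using pvReplaceGo_single c s [] s.length le_rfl

-- inner while loop of A: scan str2 with index i; on a match append str1[0] (= c0) to
-- charList and delete that character from str2; returns (new str2, new charList)
def pvInnerA (c0 : Char) (s2 : List Char) (i : Nat) (acc : List Char) : List Char × List Char :=
  if h : i < s2.length then
    if heq : s2[i] = c0 then
      pvInnerA c0 (PySem.Chars.replace s2 [s2[i]] []) i (acc ++ [c0])
    else
      pvInnerA c0 s2 (i + 1) acc
  else (s2, acc)
termination_by s2.length - i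
decreasing_by
  · rw [pvReplace_single]
    have hlt : (s2.filter (· ≠ s2[i])).length < s2.length :=
      List.length_filter_lt_length_iff_exists.mpr ⟨s2[i], s2.getElem_mem h, by simp⟩
    omega
  · omega

-- outer while loop of A: take str1's first char, run the inner scan, break if str2 is
-- exhausted, else delete that char from str1 and continue
def pvOuterA (s1 s2 acc : List Char) : List Char :=
  if h : s1 ≠ [] then
    let c0 := s1.head h
    let r := pvInnerA c0 s2 0 acc
    if r.1.length = 0 then r.2
    else pvOuterA (PySem.Chars.replace s1 [c0] []) r.1 r.2
  else acc
termination_by s1.length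
decreasing_by
  rw [pvReplace_single]
  exact List.length_filter_lt_length_iff_exists.mpr ⟨s1.head h, List.head_mem h, by simp⟩

def commonStr (str1 : String) (str2 : String) : String :=
  PySem.Str.join " " ((pvOuterA str1.toList str2.toList []).map (fun c => String.mk [c]))

-- ===== PORT B =====
-- B: present = set(str2); ' '.join(c for c in dict.fromkeys(str1) if c in present)
def commonStr_alt (str1 : String) (str2 : String) : String :=
  let present : PySem.Set Char := PySem.Set.ofList str2.toList
  PySem.Str.join " "
    (((PySem.List.dedup str1.toList).filter (fun c => PySem.Set.contains present c)).map
      (fun c => String.mk [c]))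

-- ===== PRECONDITION & SPEC =====
def Spec_commonStr (str1 : String) (str2 : String) (out : String) : Prop := out = commonStr_alt str1 str2
instance (str1 : String) (str2 : String) (out : String) : Decidable (Spec_commonStr str1 str2 out) := by unfold Spec_commonStr; infer_instance

-- ===== CLAIM (what is proved, stated in full; the proofs are below) =====
def Claim_equal_commonStr : Prop := ∀ (str1 : String) (str2 : String), Dom_commonStr str1 str2 → Spec_commonStr str1 str2 (commonStr str1 str2)

-- ===== LEMMAS AND PROOFS =====

-- the inner scan: appends c0 exactly when c0 occurs in the unscanned part of s2,
-- and in that case removes every c0 from s2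
theorem pvInner_eq (c0 : Char) (s2 : List Char) (i : Nat) (acc : List Char) :
    pvInnerA c0 s2 i acc =
      if c0 ∈ s2.drop i then (s2.filter (· ≠ c0), acc ++ [c0]) else (s2, acc) := by
  fun_induction pvInnerA with
  | case1 s2 i acc h heq ih =>
    rw [pvReplace_single] at ih ⊢
    rw [heq] at ih ⊢
    have hnot : c0 ∉ List.drop i (List.filter (fun x => decide (x ≠ c0)) s2) := by
      intro hmem
      have := List.mem_of_mem_drop hmem
      simp at this
    rw [ih, if_neg hnot]
    have hmem : c0 ∈ List.drop i s2 := by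
      rw [List.drop_eq_getElem_cons h]
      exact heq ▸ List.mem_cons_self
    rw [if_pos hmem]
  | case2 s2 i acc h heq ih =>
    rw [ih]
    by_cases hm : c0 ∈ List.drop (i + 1) s2
    · rw [if_pos hm, if_pos (by rw [List.drop_eq_getElem_cons h]; exact List.mem_cons_of_mem _ hm)]
    · rw [if_neg hm, if_neg ?_]
      rw [List.drop_eq_getElem_cons h]
      simp only [List.mem_cons, not_or]
      exact ⟨fun hc => heq hc.symm, hm⟩
  | case3 s2 i acc h =>
    rw [List.drop_eq_nil_of_le (by omega), if_neg (List.not_mem_nil)]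

-- Set.add facts used to characterise PySem.List.dedup (= Set.ofList, a foldl of Set.add)
theorem pvFoldlAdd_cons (c : Char) (ys : List Char) : ∀ s : List Char, c ∉ ys →
    ys.foldl PySem.Set.add (c :: s) = c :: ys.foldl PySem.Set.add s := by
  induction ys with
  | nil => intro s _; rfl
  | cons x t ih =>
    intro s hc
    simp only [List.mem_cons, not_or] at hc
    have hx : PySem.Set.add (c :: s) x = c :: PySem.Set.add s x := by
      have hb : (x == c) = false := beq_eq_false_iff_ne.mpr (fun hxc => hc.1 hxc.symm)
      simp only [PySem.Set.add, PySem.Set.contains, List.contains_cons, hb, Bool.false_or]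
      split <;> rfl
    simp only [List.foldl_cons, hx]
    exact ih _ hc.2

theorem pvFoldlAdd_mem (c : Char) (t : List Char) : ∀ s : List Char, c ∈ s →
    t.foldl PySem.Set.add s = (t.filter (· ≠ c)).foldl PySem.Set.add s := by
  induction t with
  | nil => intro s _; rfl
  | cons x t ih =>
    intro s hc
    by_cases hx : x = c
    · subst hx
      have hadd : PySem.Set.add s x = s := by
        simp only [PySem.Set.add, PySem.Set.contains]
        rw [if_pos (by simpa using hc)]
      have hfil : List.filter (fun y => decide (y ≠ x)) (x :: t) =
          t.filter (fun y => decide (y ≠ x)) := by simp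
      simp only [List.foldl_cons, hfil, hadd]
      exact ih s hc
    · have hfil : List.filter (fun y => decide (y ≠ c)) (x :: t) =
          x :: t.filter (fun y => decide (y ≠ c)) := by simp [hx]
      simp only [List.foldl_cons, hfil]
      refine ih (PySem.Set.add s x) ?_
      unfold PySem.Set.add
      split
      · exact hc
      · exact List.mem_append_left _ hc

theorem pvDedup_cons (c : Char) (t : List Char) :
    PySem.List.dedup (c :: t) = c :: PySem.List.dedup (t.filter (· ≠ c)) := by
  rw [PySem.List.dedup_eq_ofList, PySem.List.dedup_eq_ofList, PySem.Set.ofList_eq_foldl,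
    PySem.Set.ofList_eq_foldl]
  have h0 : PySem.Set.add ([] : List Char) c = [c] := by
    simp [PySem.Set.add, PySem.Set.contains]
  simp only [List.foldl_cons, h0]
  rw [pvFoldlAdd_mem c t [c] (List.mem_singleton.mpr rfl)]
  exact pvFoldlAdd_cons c _ [] (by simp)

theorem pvOuter_eq (s1 s2 acc : List Char) :
    pvOuterA s1 s2 acc = acc ++ (PySem.List.dedup s1).filter (fun c => decide (c ∈ s2)) := by
  fun_induction pvOuterA with
  | case1 s1 s2 acc h c0 r hr =>
    have hs1 : s1 = c0 :: s1.tail := (List.cons_head_tail h).symm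
    rw [show r = pvInnerA c0 s2 0 acc from rfl, pvInner_eq, List.drop_zero] at hr ⊢
    by_cases hc : c0 ∈ s2
    · rw [if_pos hc] at hr ⊢
      have hnil : List.filter (fun x => decide (x ≠ c0)) s2 = [] :=
        List.length_eq_zero_iff.mp hr
      conv_rhs => rw [hs1, pvDedup_cons]
      rw [List.filter_cons_of_pos (by simpa using hc)]
      have hzero : List.filter (fun c => decide (c ∈ s2))
          (PySem.List.dedup (s1.tail.filter (· ≠ c0))) = [] := by
        apply List.filter_eq_nil_iff.mpr
        intro x hx
        have hx' : x ∈ s1.tail.filter (· ≠ c0) := (PySem.List.mem_dedup _ x).mp hx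
        have hne : x ≠ c0 := by simpa using (List.mem_filter.mp hx').2
        simp only [decide_eq_true_eq]
        intro hxs
        have hmem : x ∈ List.filter (fun y => decide (y ≠ c0)) s2 :=
          List.mem_filter.mpr ⟨hxs, by simp [hne]⟩
        rw [hnil] at hmem
        simp at hmem
      rw [hzero]
    · rw [if_neg hc] at hr ⊢
      have : s2 = [] := List.length_eq_zero_iff.mp hr
      subst this
      simp
  | case2 s1 s2 acc h c0 r hr ih =>
    have hs1 : s1 = c0 :: s1.tail := (List.cons_head_tail h).symm
    have hfil : List.filter (fun x => decide (x ≠ c0)) s1 =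
        List.filter (fun x => decide (x ≠ c0)) s1.tail := by
      conv_lhs => rw [hs1]
      simp
    rw [show r = pvInnerA c0 s2 0 acc from rfl, pvInner_eq, List.drop_zero] at hr ih ⊢
    rw [pvReplace_single, hfil] at ih ⊢
    by_cases hc : c0 ∈ s2
    · rw [if_pos hc] at hr ih ⊢
      rw [ih]
      conv_rhs => rw [hs1, pvDedup_cons]
      rw [List.filter_cons_of_pos (by simpa using hc)]
      have hsame : List.filter (fun c => decide (c ∈ List.filter (fun x => decide (x ≠ c0)) s2))
          (PySem.List.dedup (s1.tail.filter (· ≠ c0))) =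
          List.filter (fun c => decide (c ∈ s2)) (PySem.List.dedup (s1.tail.filter (· ≠ c0))) := by
        apply List.filter_congr
        intro x hx
        have hx' : x ∈ s1.tail.filter (· ≠ c0) := (PySem.List.mem_dedup _ x).mp hx
        have hne : x ≠ c0 := by simpa using (List.mem_filter.mp hx').2
        simp [List.mem_filter, hne]
      rw [hsame]
      simp
    · rw [if_neg hc] at hr ih ⊢
      rw [ih]
      conv_rhs => rw [hs1, pvDedup_cons]
      rw [List.filter_cons_of_neg (by simpa using hc)]
  | case3 s1 s2 acc h =>
    have : s1 = [] := not_not.mp (by simpa using h)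
    subst this
    simp [PySem.List.dedup_eq_ofList, PySem.Set.ofList_eq_foldl]

theorem pvContains_ofList (s2 : List Char) (c : Char) :
    PySem.Set.contains (PySem.Set.ofList s2) c = decide (c ∈ s2) := by
  by_cases h : c ∈ s2 <;> simp [PySem.Set.contains, h]

theorem commonStr_spec : Claim_equal_commonStr := by
  intro str1 str2 _
  unfold Spec_commonStr commonStr commonStr_alt
  rw [pvOuter_eq]
  simp only [List.nil_append]
  congr 2
  apply List.filter_congr
  intro c _
  rw [pvContains_ofList]
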